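-- pv_equiv track=rewrite | github.com/RoknuzzamanRokon/for-editor-api | backend/services/file_manager.py | _extract_original_name
-- ===== SOURCE A (Python) =====
-- def _extract_original_name(filename: str) -> str:
--     """
--     Extract original name from generated filename
--
--     Args:
--         filename: Generated filename (e.g., invoice_20260207_194943_abc12345.xlsx)
--
--     Returns:
--         Original name portion
--     """
--     # Remove .xlsx extension
--     name_without_ext = filename.rsplit('.', 1)[0]
--
--     # Split by underscore
--     parts = name_without_ext.split('_')
--
--     if len(parts) < 3:
--         # Not enough parts to have timestamp and uuid
--         return name_without_ext
--
--     # The last part should be UUID (6-8 chars hex)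
--     # The second-to-last should be time (HHMMSS - 6 digits)
--     # The third-to-last should be date (YYYYMMDD - 8 digits)
--
--     # Check if last part looks like UUID (6-8 hex chars)
--     if 6 <= len(parts[-1]) <= 8 and all(c in '0123456789abcdef' for c in parts[-1].lower()):
--         # Check if second-to-last looks like time (6 digits)
--         if len(parts) >= 2 and len(parts[-2]) == 6 and parts[-2].isdigit():
--             # Check if third-to-last looks like date (8 digits)
--             if len(parts) >= 3 and len(parts[-3]) == 8 and parts[-3].isdigit():
--                 # Remove last three parts (date, time, uuid)
--                 original_parts = parts[:-3]
--                 if original_parts: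
--                     return '_'.join(original_parts)
--
--     # Fallback: just return the name without extension
--     return name_without_ext
-- ===== SOURCE B (Python) =====
-- def _extract_original_name(filename: str) -> str:
--     name = filename.rsplit('.', 1)[0]
--     n = len(name)
--     # The generated suffix has a rigid shape: underscore, 8 digits, underscore, 6 digits,
--     # underscore, uuid of 6..8 hex chars.  Only the uuid length varies, so try the
--     # three candidate lengths and validate the suffix at fixed offsets.
--     for L in (6, 7, 8):
--         k = n - L - 17  # index of the underscore that precedes the date block
--         if (k >= 0
--                 and name[k] == '_' and name[k + 9] == '_' and name[k + 16] == '_'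
--                 and name[k + 1:k + 9].isdigit()
--                 and name[k + 10:k + 16].isdigit()
--                 and all(c in '0123456789abcdef' for c in name[k + 17:].lower())):
--             return name[:k]
--     return name
-- ===== Notes on version B (the rewrite author's own statement) =====
-- stated objective: alternative
-- what changed: B never splits the name into parts: it validates the generated suffix positionally (underscores and digit/hex fields at fixed offsets from the end, one check per candidate uuid length 6/7/8) and returns the prefix by index, replacing A's split('_'), negatively-indexed nested checks and join-based reconstruction.
import Mathlib
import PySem

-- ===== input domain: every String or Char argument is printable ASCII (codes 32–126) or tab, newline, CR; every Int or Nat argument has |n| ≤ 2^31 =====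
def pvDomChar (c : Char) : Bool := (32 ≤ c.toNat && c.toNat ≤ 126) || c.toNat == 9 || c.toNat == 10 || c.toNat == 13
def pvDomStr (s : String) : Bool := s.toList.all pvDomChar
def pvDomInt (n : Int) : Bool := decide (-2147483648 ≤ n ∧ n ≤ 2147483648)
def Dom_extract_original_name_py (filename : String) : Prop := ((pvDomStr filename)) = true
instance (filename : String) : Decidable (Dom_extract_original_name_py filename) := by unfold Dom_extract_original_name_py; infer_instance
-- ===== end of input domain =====

-- B validates the generated suffix at fixed offsets from the end (one positional check per
-- candidate uuid length 6/7/8) instead of A's split-into-parts with nested checks; objective: alternative.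

-- Model of Python's str.rsplit(sep, maxsplit) for a one-char sep and maxsplit ≥ 0, on List Char.
-- Exact: at most `m` splits taken from the right; the remainder is joined back as the first piece.
def pyRsplit (cs : List Char) (sep : Char) (m : Nat) : List (List Char) :=
  let p := PySem.Chars.splitOn cs [sep]
  if p.length ≤ m + 1 then p
  else PySem.Chars.join [sep] (p.take (p.length - m)) :: p.drop (p.length - m)

-- ===== PORT A =====
def extract_original_name_py (filename : String) : String :=
  -- name_without_ext = filename.rsplit('.', 1)[0]
  let name := (pyRsplit filename.toList '.' 1).headI
  -- parts = name_without_ext.split('_')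
  let parts := PySem.Chars.splitOn name ['_']
  if parts.length < 3 then String.ofList name
  else
    let p1 := (PySem.List.pyGet? parts (-1)).getD []   -- parts[-1]
    let p2 := (PySem.List.pyGet? parts (-2)).getD []   -- parts[-2]
    let p3 := (PySem.List.pyGet? parts (-3)).getD []   -- parts[-3]
    if 6 ≤ p1.length && p1.length ≤ 8 &&
       (PySem.Chars.lower p1).all (fun c => PySem.Chars.isIn [c] "0123456789abcdef".toList) then
      if 2 ≤ parts.length && p2.length == 6 && PySem.Chars.strIsdigit p2 then
        if 3 ≤ parts.length && p3.length == 8 && PySem.Chars.strIsdigit p3 then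
          let original_parts := PySem.List.slice parts none (some (-3))   -- parts[:-3]
          if original_parts ≠ [] then String.ofList (PySem.Chars.join ['_'] original_parts)
          else String.ofList name
        else String.ofList name
      else String.ofList name
    else String.ofList name

-- ===== PORT B =====
-- the body of B's `if` for one candidate uuid length L (short-circuit `and` chain, same order)
def tryL (name : List Char) (L : Int) : Bool :=
  let n : Int := name.length
  let k := n - L - 17
  decide (0 ≤ k) &&
  (PySem.List.pyGet? name k == some '_') &&
  (PySem.List.pyGet? name (k + 9) == some '_') &&
  (PySem.List.pyGet? name (k + 16) == some '_') &&
  PySem.Chars.strIsdigit (PySem.List.slice name (some (k + 1)) (some (k + 9))) &&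
  PySem.Chars.strIsdigit (PySem.List.slice name (some (k + 10)) (some (k + 16))) &&
  (PySem.Chars.lower (PySem.List.slice name (some (k + 17)) none)).all
      (fun c => PySem.Chars.isIn [c] "0123456789abcdef".toList)

def extract_original_name_py_alt (filename : String) : String :=
  let name := (pyRsplit filename.toList '.' 1).headI
  -- for L in (6, 7, 8): if <checks at fixed offsets> : return name[:k]
  match ([6, 7, 8] : List Int).find? (tryL name) with
  | some L => String.ofList (PySem.List.slice name none (some ((name.length : Int) - L - 17)))
  | none => String.ofList name

-- ===== PRECONDITION & SPEC =====
def Spec_extract_original_name_py (filename : String) (out : String) : Prop := out = extract_original_name_py_alt filename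
instance (filename : String) (out : String) : Decidable (Spec_extract_original_name_py filename out) := by unfold Spec_extract_original_name_py; infer_instance

-- ===== CLAIM (what is proved, stated in full; the proofs are below) =====
def Claim_equal_extract_original_name_py : Prop := ∀ (filename : String), Dom_extract_original_name_py filename → Spec_extract_original_name_py filename (extract_original_name_py filename)

-- ===== LEMMAS AND PROOFS =====

-- structural reference for Python's split('_') (single-char separator)
def sp : List Char → List (List Char)
  | [] => [[]]
  | c :: r => if c = '_' then [] :: sp r else (c :: (sp r).headI) :: (sp r).tail

theorem sp_ne_nil (l : List Char) : sp l ≠ [] := by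
  cases l with
  | nil => simp [sp]
  | cons c r => simp only [sp]; split <;> simp

theorem go_eq (fuel : Nat) (l cur : List Char) (acc : List (List Char))
    (h : l.length + 1 ≤ fuel) :
    PySem.Chars.splitOn.go ['_'] fuel l cur acc
      = acc.reverse ++ (sp l).modifyHead (cur.reverse ++ ·) := by
  induction fuel generalizing l cur acc with
  | zero => omega
  | succ f ih =>
    cases l with
    | nil => simp [PySem.Chars.splitOn.go, sp]
    | cons c r =>
      obtain ⟨a, t, he⟩ := List.exists_cons_of_ne_nil (sp_ne_nil r)
      by_cases hc : c = '_'
      · subst hc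
        rw [PySem.Chars.splitOn.go]
        simp only [List.length_cons] at *
        rw [ih _ _ _ (by simp at h ⊢; omega)]
        simp [sp, he]
      · rw [PySem.Chars.splitOn.go]
        have hne : (('_' == c) && true) = false := by simp [Ne.symm hc]
        simp only [List.isPrefixOf, hne, Bool.false_eq_true, if_false]
        rw [ih _ _ _ (by simp at h ⊢; omega)]
        simp [sp, hc, he]

theorem splitOn_eq_sp (cs : List Char) : PySem.Chars.splitOn cs ['_'] = sp cs := by
  rw [PySem.Chars.splitOn, go_eq _ _ _ _ (by omega)]
  obtain ⟨a, t, he⟩ := List.exists_cons_of_ne_nil (sp_ne_nil cs)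
  simp [he]

theorem sp_append (xs ys : List Char) : sp (xs ++ '_' :: ys) = sp xs ++ sp ys := by
  induction xs with
  | nil => simp [sp]
  | cons c r ih =>
    obtain ⟨a, t, he⟩ := List.exists_cons_of_ne_nil (sp_ne_nil r)
    by_cases hc : c = '_' <;> simp [sp, hc, ih, he]

theorem sp_no_sep (xs : List Char) (h : '_' ∉ xs) : sp xs = [xs] := by
  induction xs with
  | nil => rfl
  | cons c r ih =>
    simp only [List.mem_cons, not_or] at h
    simp [sp, ih h.2, Ne.symm h.1]

theorem ic_cons_ne (a : List Char) (l : List (List Char)) (h : l ≠ []) :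
    ['_'].intercalate (a :: l) = a ++ '_' :: ['_'].intercalate l := by
  cases l with
  | nil => simp at h
  | cons b t => cases t <;> simp [List.intercalate]

theorem join_sp (xs : List Char) : PySem.Chars.join ['_'] (sp xs) = xs := by
  induction xs with
  | nil => rfl
  | cons c r ih =>
    obtain ⟨a, t, he⟩ := List.exists_cons_of_ne_nil (sp_ne_nil r)
    rw [PySem.Chars.join] at ih ⊢
    by_cases hc : c = '_'
    · subst hc
      simp only [sp, if_true]
      rw [ic_cons_ne _ _ (sp_ne_nil r), ih]
      rfl
    · simp only [sp, hc, if_false]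
      rw [he] at ih ⊢
      cases t <;> simp_all [List.intercalate]

theorem join_append3 (front : List (List Char)) (x y z : List Char) (h : front ≠ []) :
    PySem.Chars.join ['_'] (front ++ [x, y, z])
      = PySem.Chars.join ['_'] front ++ '_' :: (x ++ '_' :: (y ++ '_' :: z)) := by
  induction front with
  | nil => simp at h
  | cons a t ih =>
    rw [PySem.Chars.join, PySem.Chars.join]
    cases t with
    | nil => simp [List.intercalate]
    | cons b t' =>
      rw [List.cons_append, ic_cons_ne _ _ (by simp), ic_cons_ne _ _ (by simp)]
      rw [PySem.Chars.join] at ih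
      rw [ih (by simp), PySem.Chars.join]
      simp

theorem digit_no_underscore (x : List Char) (h : PySem.Chars.strIsdigit x = true) : '_' ∉ x := by
  intro hm
  rw [PySem.Chars.strIsdigit, Bool.and_eq_true] at h
  have := (List.all_eq_true.mp h.2) _ hm
  revert this
  decide

theorem hex_no_underscore (z : List Char)
    (h : (PySem.Chars.lower z).all (fun c => PySem.Chars.isIn [c] "0123456789abcdef".toList) = true) :
    '_' ∉ z := by
  intro hm
  have hm2 : '_' ∈ PySem.Chars.lower z := by
    rw [PySem.Chars.lower]
    exact List.mem_map.mpr ⟨'_', hm, by decide⟩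
  have := (List.all_eq_true.mp h) _ hm2
  revert this
  decide

-- the decomposition that makes both programs strip the suffix
def Dcmp (name pre x y z : List Char) : Prop :=
  name = pre ++ '_' :: (x ++ '_' :: (y ++ '_' :: z)) ∧
  x.length = 8 ∧ PySem.Chars.strIsdigit x = true ∧
  y.length = 6 ∧ PySem.Chars.strIsdigit y = true ∧
  6 ≤ z.length ∧ z.length ≤ 8 ∧
  (PySem.Chars.lower z).all (fun c => PySem.Chars.isIn [c] "0123456789abcdef".toList) = true

-- A's body after the extension strip
def Acore (name : List Char) : String :=
  let parts := PySem.Chars.splitOn name ['_']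
  if parts.length < 3 then String.ofList name
  else
    let p1 := (PySem.List.pyGet? parts (-1)).getD []
    let p2 := (PySem.List.pyGet? parts (-2)).getD []
    let p3 := (PySem.List.pyGet? parts (-3)).getD []
    if 6 ≤ p1.length && p1.length ≤ 8 &&
       (PySem.Chars.lower p1).all (fun c => PySem.Chars.isIn [c] "0123456789abcdef".toList) then
      if 2 ≤ parts.length && p2.length == 6 && PySem.Chars.strIsdigit p2 then
        if 3 ≤ parts.length && p3.length == 8 && PySem.Chars.strIsdigit p3 then
          let original_parts := PySem.List.slice parts none (some (-3))
          if original_parts ≠ [] then String.ofList (PySem.Chars.join ['_'] original_parts)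
          else String.ofList name
        else String.ofList name
      else String.ofList name
    else String.ofList name

-- B's body after the extension strip
def Bcore (name : List Char) : String :=
  match ([6, 7, 8] : List Int).find? (tryL name) with
  | some L => String.ofList (PySem.List.slice name none (some ((name.length : Int) - L - 17)))
  | none => String.ofList name

theorem A_of_dcmp (name pre x y z : List Char) (h : Dcmp name pre x y z) :
    Acore name = String.ofList pre := by
  obtain ⟨hn, hx8, hxd, hy6, hyd, hz6, hz8, hzh⟩ := h
  have hparts : PySem.Chars.splitOn name ['_'] = sp pre ++ [x, y, z] := by
    rw [splitOn_eq_sp, hn, sp_append, sp_append, sp_append,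
        sp_no_sep _ (digit_no_underscore _ hxd), sp_no_sep _ (digit_no_underscore _ hyd),
        sp_no_sep _ (hex_no_underscore _ hzh)]
    simp
  obtain ⟨f0, fr, hf⟩ := List.exists_cons_of_ne_nil (sp_ne_nil pre)
  rw [hf] at hparts
  have h1 : PySem.List.pyGet? ((f0 :: fr) ++ [x, y, z]) (-1) = some z := by
    rw [PySem.List.pyGet?_neg_one,
        show (f0 :: fr) ++ [x, y, z] = ((f0 :: fr) ++ [x, y]) ++ [z] from by simp,
        List.getLast?_concat]
  have h2 : PySem.List.pyGet? ((f0 :: fr) ++ [x, y, z]) (-2) = some y := by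
    rw [PySem.List.pyGet?_neg_ofNat _ 2 (by omega) (by simp)]
    rw [show ((f0 :: fr) ++ [x, y, z]).length - 2 = (f0 :: fr).length + 1 from by simp]
    rw [List.getElem?_append_right (by simp)]
    simp
  have h3 : PySem.List.pyGet? ((f0 :: fr) ++ [x, y, z]) (-3) = some x := by
    rw [PySem.List.pyGet?_neg_ofNat _ 3 (by omega) (by simp)]
    rw [show ((f0 :: fr) ++ [x, y, z]).length - 3 = (f0 :: fr).length from by simp]
    rw [List.getElem?_append_right (by omega)]
    simp
  have hsl : PySem.List.slice ((f0 :: fr) ++ [x, y, z]) none (some (-3)) = f0 :: fr := by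
    rw [PySem.List.slice_to_neg_ofNat _ 3 (by omega),
        show ((f0 :: fr) ++ [x, y, z]).length - 3 = (f0 :: fr).length from by simp,
        List.take_left]
  unfold Acore
  rw [hparts]
  rw [if_neg (by simp)]
  simp only [h1, h2, h3, hsl, Option.getD_some]
  rw [if_pos (by simp only [hzh, Bool.and_true]; simp [hz6, hz8]),
      if_pos (by simp [hy6, hyd]),
      if_pos (by simp [hx8, hxd]),
      if_pos (by simp)]
  rw [← hf, join_sp]

theorem A_no_dcmp (name : List Char) (h : ∀ pre x y z, ¬ Dcmp name pre x y z) :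
    Acore name = String.ofList name := by
  unfold Acore
  dsimp only
  split_ifs with h1 h2 h3 h4 h5 <;> try rfl
  exfalso
  have hsp : PySem.Chars.splitOn name ['_'] = sp name := splitOn_eq_sp name
  rcases hr : (PySem.Chars.splitOn name ['_']).reverse with _ | ⟨z, _ | ⟨y, _ | ⟨x, fr⟩⟩⟩
  · exact h1 (by have := congrArg List.length hr; simp at this; simp [this])
  · exact h1 (by have := congrArg List.length hr; simp at this; omega)
  · exact h1 (by have := congrArg List.length hr; simp at this; omega)
  have hparts : PySem.Chars.splitOn name ['_'] = fr.reverse ++ [x, y, z] := by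
    have := congrArg List.reverse hr
    simpa using this
  have hfr : fr ≠ [] := by
    intro he
    rw [he] at hparts
    rw [hparts] at h5
    rw [PySem.List.slice_to_neg_ofNat _ 3 (by omega)] at h5
    simp at h5
  obtain ⟨f0, fr', hf⟩ := List.exists_cons_of_ne_nil (fun he => hfr (by simpa using congrArg List.reverse he) : fr.reverse ≠ [])
  rw [hf] at hparts
  rw [hparts] at h2 h3 h4
  have h1' : PySem.List.pyGet? ((f0 :: fr') ++ [x, y, z]) (-1) = some z := by
    rw [PySem.List.pyGet?_neg_one,
        show (f0 :: fr') ++ [x, y, z] = ((f0 :: fr') ++ [x, y]) ++ [z] from by simp,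
        List.getLast?_concat]
  have h2' : PySem.List.pyGet? ((f0 :: fr') ++ [x, y, z]) (-2) = some y := by
    rw [PySem.List.pyGet?_neg_ofNat _ 2 (by omega) (by simp)]
    rw [show ((f0 :: fr') ++ [x, y, z]).length - 2 = (f0 :: fr').length + 1 from by simp]
    rw [List.getElem?_append_right (by simp)]
    simp
  have h3' : PySem.List.pyGet? ((f0 :: fr') ++ [x, y, z]) (-3) = some x := by
    rw [PySem.List.pyGet?_neg_ofNat _ 3 (by omega) (by simp)]
    rw [show ((f0 :: fr') ++ [x, y, z]).length - 3 = (f0 :: fr').length from by simp]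
    rw [List.getElem?_append_right (by omega)]
    simp
  rw [h1', Option.getD_some] at h2
  rw [h2', Option.getD_some] at h3
  rw [h3', Option.getD_some] at h4
  simp only [Bool.and_eq_true, decide_eq_true_eq, List.all_eq_true, beq_iff_eq] at h2 h3 h4
  have hname : name = PySem.Chars.join ['_'] (f0 :: fr') ++ '_' :: (x ++ '_' :: (y ++ '_' :: z)) := by
    conv_lhs => rw [← join_sp name, ← hsp, hparts]
    exact join_append3 _ _ _ _ (by simp)
  exact h (PySem.Chars.join ['_'] (f0 :: fr')) x y z
    ⟨hname, h4.1.2, h4.2, h3.1.2, h3.2, h2.1.1, h2.1.2,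
     List.all_eq_true.mpr h2.2⟩

theorem tryL_of_dcmp (name pre x y z : List Char) (h : Dcmp name pre x y z) :
    tryL name (z.length : Int) = true := by
  obtain ⟨hn, hx8, hxd, hy6, hyd, hz6, hz8, hzh⟩ := h
  have hlen : name.length = pre.length + 17 + z.length := by
    rw [hn]; simp [hx8, hy6]; omega
  have dd : ∀ j : Nat, List.drop (pre.length + j) name
      = List.drop j ('_' :: (x ++ '_' :: (y ++ '_' :: z))) := by
    intro j
    rw [hn, ← List.drop_drop, List.drop_left]
  have gg : ∀ j : Nat, name[pre.length + j]?
      = ('_' :: (x ++ '_' :: (y ++ '_' :: z)))[j]? := by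
    intro j
    rw [hn, List.getElem?_append_right (by omega)]
    simp
  have e9 : ('_' :: (x ++ '_' :: (y ++ '_' :: z)))[9]? = some '_' := by
    show (x ++ '_' :: (y ++ '_' :: z))[8]? = some '_'
    rw [List.getElem?_append_right (by omega), hx8]
    simp
  have e16 : ('_' :: (x ++ '_' :: (y ++ '_' :: z)))[16]? = some '_' := by
    show (x ++ '_' :: (y ++ '_' :: z))[15]? = some '_'
    rw [List.getElem?_append_right (by omega), hx8]
    show (y ++ '_' :: z)[6]? = some '_'
    rw [List.getElem?_append_right (by omega), hy6]
    simp
  have d10 : List.drop 10 ('_' :: (x ++ '_' :: (y ++ '_' :: z))) = y ++ '_' :: z := by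
    show List.drop 9 (x ++ '_' :: (y ++ '_' :: z)) = y ++ '_' :: z
    rw [show (9 : Nat) = 8 + 1 from rfl, ← List.drop_drop, List.drop_left' hx8]
    rfl
  have d17 : List.drop 17 ('_' :: (x ++ '_' :: (y ++ '_' :: z))) = z := by
    show List.drop 16 (x ++ '_' :: (y ++ '_' :: z)) = z
    rw [show (16 : Nat) = 8 + 8 from rfl, ← List.drop_drop, List.drop_left' hx8]
    show List.drop 7 (y ++ '_' :: z) = z
    rw [show (7 : Nat) = 6 + 1 from rfl, ← List.drop_drop, List.drop_left' hy6]
    rfl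
  unfold tryL
  dsimp only
  have hk : (name.length : Int) - (z.length : Int) - 17 = ((pre.length : Nat) : Int) := by
    push_cast [hlen]; ring
  rw [hk]
  rw [show ((pre.length : Nat) : Int) + 9 = ((pre.length + 9 : Nat) : Int) from by push_cast; ring,
      show ((pre.length : Nat) : Int) + 16 = ((pre.length + 16 : Nat) : Int) from by push_cast; ring,
      show ((pre.length : Nat) : Int) + 1 = ((pre.length + 1 : Nat) : Int) from by push_cast; ring,
      show ((pre.length : Nat) : Int) + 10 = ((pre.length + 10 : Nat) : Int) from by push_cast; ring,
      show ((pre.length : Nat) : Int) + 17 = ((pre.length + 17 : Nat) : Int) from by push_cast; ring]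
  rw [PySem.List.pyGet?_natCast, PySem.List.pyGet?_natCast, PySem.List.pyGet?_natCast,
      PySem.List.slice_natCast, PySem.List.slice_natCast, PySem.List.slice_from_natCast]
  rw [show name[pre.length]? = ('_' :: (x ++ '_' :: (y ++ '_' :: z)))[0]? from by
        simpa using gg 0,
      gg 9, gg 16, e9, e16]
  rw [show pre.length + 9 - (pre.length + 1) = 8 from by omega,
      show pre.length + 16 - (pre.length + 10) = 6 from by omega]
  rw [dd 1, dd 10, dd 17, d10, d17]
  rw [show List.drop 1 ('_' :: (x ++ '_' :: (y ++ '_' :: z))) = x ++ '_' :: (y ++ '_' :: z) from rfl]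
  rw [List.take_left' hx8, List.take_left' hy6]
  simp only [hzh, Bool.and_true]
  simp [hxd, hyd]

theorem dcmp_of_tryL (name : List Char) (L : Int) (hL : L ∈ ([6, 7, 8] : List Int))
    (h : tryL name L = true) :
    Dcmp name (name.take ((name.length : Int) - L - 17).toNat)
      ((name.drop (((name.length : Int) - L - 17).toNat + 1)).take 8)
      ((name.drop (((name.length : Int) - L - 17).toNat + 10)).take 6)
      (name.drop (((name.length : Int) - L - 17).toNat + 17)) := by
  have hL68 : 6 ≤ L ∧ L ≤ 8 := by
    simp at hL
    rcases hL with rfl | rfl | rfl <;> omega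
  unfold tryL at h
  dsimp only at h
  simp only [Bool.and_eq_true, decide_eq_true_eq, beq_iff_eq] at h
  obtain ⟨⟨⟨⟨⟨⟨hk0, h1⟩, h2⟩, h3⟩, h4⟩, h5⟩, h6⟩ := h
  set p : Nat := ((name.length : Int) - L - 17).toNat with hp
  have hkp : (name.length : Int) - L - 17 = (p : Int) := by omega
  rw [hkp, PySem.List.pyGet?_natCast] at h1
  rw [hkp, show ((p : Nat) : Int) + 9 = ((p + 9 : Nat) : Int) from by push_cast; ring,
      PySem.List.pyGet?_natCast] at h2
  rw [hkp, show ((p : Nat) : Int) + 16 = ((p + 16 : Nat) : Int) from by push_cast; ring,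
      PySem.List.pyGet?_natCast] at h3
  rw [hkp, show ((p : Nat) : Int) + 1 = ((p + 1 : Nat) : Int) from by push_cast; ring,
      show ((p : Nat) : Int) + 9 = ((p + 9 : Nat) : Int) from by push_cast; ring,
      PySem.List.slice_natCast, show p + 9 - (p + 1) = 8 from by omega] at h4
  rw [hkp, show ((p : Nat) : Int) + 10 = ((p + 10 : Nat) : Int) from by push_cast; ring,
      show ((p : Nat) : Int) + 16 = ((p + 16 : Nat) : Int) from by push_cast; ring,
      PySem.List.slice_natCast, show p + 16 - (p + 10) = 6 from by omega] at h5
  rw [hkp, show ((p : Nat) : Int) + 17 = ((p + 17 : Nat) : Int) from by push_cast; ring,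
      PySem.List.slice_from_natCast] at h6
  have hn : p + 17 + L.toNat = name.length := by omega
  have hplt : p < name.length := by omega
  have hplt9 : p + 9 < name.length := by omega
  have hplt16 : p + 16 < name.length := by omega
  have g1 : name[p] = '_' := by
    have := List.getElem?_eq_some_iff.mp h1; exact this.choose_spec
  have g2 : name[p + 9] = '_' := by
    have := List.getElem?_eq_some_iff.mp h2; exact this.choose_spec
  have g3 : name[p + 16] = '_' := by
    have := List.getElem?_eq_some_iff.mp h3; exact this.choose_spec
  have hx8 : ((name.drop (p + 1)).take 8).length = 8 := by
    simp; omega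
  have hy6 : ((name.drop (p + 10)).take 6).length = 6 := by
    simp; omega
  have hname : name = name.take p ++ '_' ::
      ((name.drop (p + 1)).take 8 ++ '_' ::
        ((name.drop (p + 10)).take 6 ++ '_' :: name.drop (p + 17))) := by
    conv_lhs => rw [← List.take_append_drop p name]
    congr 1
    rw [List.drop_eq_getElem_cons hplt, g1]
    congr 1
    conv_lhs => rw [← List.take_append_drop 8 (name.drop (p + 1))]
    congr 1
    rw [List.drop_drop, show p + 1 + 8 = p + 9 from by omega,
        List.drop_eq_getElem_cons hplt9, g2]
    congr 1
    conv_lhs => rw [← List.take_append_drop 6 (name.drop (p + 10))]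
    congr 1
    rw [List.drop_drop, show p + 10 + 6 = p + 16 from by omega,
        List.drop_eq_getElem_cons hplt16, g3]
  exact ⟨hname, hx8, h4, hy6, h5, by simp; omega, by simp; omega, h6⟩

theorem AB (name : List Char) : Acore name = Bcore name := by
  unfold Bcore
  cases hf : ([6, 7, 8] : List Int).find? (tryL name) with
  | some L =>
    have hm := List.mem_of_find?_eq_some hf
    have ht := List.find?_some hf
    rw [A_of_dcmp _ _ _ _ _ (dcmp_of_tryL name L hm ht)]
    have hk0 : 0 ≤ (name.length : Int) - L - 17 := by
      unfold tryL at ht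
      dsimp only at ht
      simp only [Bool.and_eq_true, decide_eq_true_eq] at ht
      exact ht.1.1.1.1.1.1
    dsimp only
    rw [PySem.List.slice_to _ hk0]
  | none =>
    dsimp only
    rw [A_no_dcmp]
    intro pre x y z hd
    have ht := tryL_of_dcmp _ _ _ _ _ hd
    have hmem : ((z.length : Nat) : Int) ∈ ([6, 7, 8] : List Int) := by
      obtain ⟨_, _, _, _, _, hz6, hz8, _⟩ := hd
      have : z.length = 6 ∨ z.length = 7 ∨ z.length = 8 := by omega
      rcases this with h | h | h <;> simp [h]
    have := List.find?_eq_none.mp hf _ hmem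
    rw [ht] at this
    exact absurd rfl this

-- ===== VERDICT (by name: the statement is the Claim_ definition above) =====
theorem extract_original_name_py_spec : Claim_equal_extract_original_name_py := by
  intro filename _
  unfold Spec_extract_original_name_py
  exact AB ((pyRsplit filename.toList '.' 1).headI)
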